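-- pv_equiv track=rewrite | github.com/can23384/Proyecto01_Generador-de-analizadores-l-xicos | token_utils.py | sanitize_token_name
-- ===== SOURCE A (Python) =====
-- def sanitize_token_name(text: str):
--     # Limpia el nombre del token: mayúsculas, reemplaza caracteres especiales con _
--     out = []
--     prev_underscore = False
--
--     for ch in text.upper():
--         if ch.isalnum():
--             out.append(ch)
--             prev_underscore = False
--         else:
--             if out and not prev_underscore:
--                 out.append("_")
--                 prev_underscore = True
--
--     token = "".join(out).strip("_")
--     if not token:
--         return None
--     if token[0].isdigit():
--         token = f"TOKEN_{token}"  # Si comienza con número lo prefija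
--     return token
-- ===== SOURCE B (Python) =====
-- def sanitize_token_name(text: str):
--     # Map every non-alphanumeric character to a space, then let split() find the
--     # maximal alphanumeric words; joining them with '_' collapses separator runs
--     # and drops leading/trailing separators in one go.
--     cleaned = "".join(c if c.isalnum() else " " for c in text.upper())
--     words = cleaned.split()
--     if not words:
--         return None
--     token = "_".join(words)
--     if token[0].isdigit():
--         token = "TOKEN_" + token
--     return token
-- ===== Notes on version B (the rewrite author's own statement) =====
-- stated objective: simpler
-- what changed: Replaces the character-by-character state machine (pending-underscore flag, nonempty-output guard, final edge strip) by mapping each non-alphanumeric to a space and joining the words found by str.split() with underscores.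
import Mathlib
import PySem

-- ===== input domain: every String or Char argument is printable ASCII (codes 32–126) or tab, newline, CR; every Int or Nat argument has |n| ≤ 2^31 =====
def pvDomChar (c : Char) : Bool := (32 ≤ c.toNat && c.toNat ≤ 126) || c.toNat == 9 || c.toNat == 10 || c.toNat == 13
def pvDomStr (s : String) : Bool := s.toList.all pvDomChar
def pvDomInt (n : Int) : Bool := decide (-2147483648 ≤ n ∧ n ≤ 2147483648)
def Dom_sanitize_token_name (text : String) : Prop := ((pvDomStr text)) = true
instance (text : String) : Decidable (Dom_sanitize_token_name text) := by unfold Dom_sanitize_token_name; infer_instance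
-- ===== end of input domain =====

-- B replaces A's character state machine (prev_underscore flag, emptiness guard, final strip)
-- by mapping non-alphanumerics to spaces and joining str.split()'s words with '_' (simpler).


-- ===== PORT A =====
-- the loop body of A: append alnum chars, otherwise append '_' once if out is nonempty
def sanitizeStepA (s : List Char × Bool) (ch : Char) : List Char × Bool :=
  if PySem.Chars.isalnum ch then (s.1 ++ [ch], false)
  else if s.1 ≠ [] ∧ s.2 = false then (s.1 ++ ['_'], true) else s

def sanitize_token_name (text : String) : Option String :=
  let r := (PySem.Chars.upper text.toList).foldl sanitizeStepA ([], false)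
  let token := PySem.Chars.stripChars r.1 ['_']
  if token = [] then none
  else if PySem.Chars.isdigit (PySem.List.pyGetD token 0 ' ') = true
  then some (String.mk ("TOKEN_".toList ++ token))
  else some (String.mk token)

-- ===== PORT B =====
-- B's classifier: keep alphanumerics, turn everything else into a space
def sanitizeCleanB (c : Char) : Char := if PySem.Chars.isalnum c then c else ' '

def sanitize_token_name_alt (text : String) : Option String :=
  let cleaned := (PySem.Chars.upper text.toList).map sanitizeCleanB
  let words := PySem.Chars.split₀ cleaned
  if words = [] then none
  else
    let token := PySem.Chars.join ['_'] words
    if PySem.Chars.isdigit (PySem.List.pyGetD token 0 ' ') = true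
    then some (String.mk ("TOKEN_".toList ++ token))
    else some (String.mk token)

-- ===== PRECONDITION & SPEC =====
def Spec_sanitize_token_name (text : String) (out : Option String) : Prop := out = sanitize_token_name_alt text
instance (text : String) (out : Option String) : Decidable (Spec_sanitize_token_name text out) := by unfold Spec_sanitize_token_name; infer_instance

-- ===== CLAIM (what is proved, stated in full; the proofs are below) =====
def Claim_equal_sanitize_token_name : Prop := ∀ (text : String), Dom_sanitize_token_name text → Spec_sanitize_token_name text (sanitize_token_name text)

-- ===== LEMMAS AND PROOFS =====

-- the suffix A's loop emits from a nonempty-out state with pending flag p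
def emitA (p : Bool) : List Char → List Char × Bool
  | [] => ([], p)
  | c :: cs =>
    if PySem.Chars.isalnum c then
      let r := emitA false cs; (c :: r.1, r.2)
    else if p then emitA true cs
    else let r := emitA true cs; ('_' :: r.1, r.2)

-- A's whole out buffer (leading non-alnum chars emit nothing)
def emitS : List Char → List Char
  | [] => []
  | c :: cs => if PySem.Chars.isalnum c then c :: (emitA false cs).1 else emitS cs

-- the words split₀ produces on the cleaned list, with reversed current word cur
def wordsRec : List Char → List Char → List (List Char)
  | [], cur => if cur.isEmpty then [] else [cur.reverse]
  | c :: cs, cur =>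
    if PySem.Chars.isalnum c then wordsRec cs (c :: cur)
    else if cur.isEmpty then wordsRec cs [] else cur.reverse :: wordsRec cs []

lemma alnum_ne_und {c : Char} (h : PySem.Chars.isalnum c = true) : c ≠ '_' := by
  intro e; subst e; exact absurd h (by decide)

lemma alnum_not_space {c : Char} (h : PySem.Chars.isalnum c = true) :
    PySem.Chars.isspace c = false := by
  simp [PySem.Chars.isalnum, PySem.Chars.isalpha, PySem.Chars.isupper, PySem.Chars.islower,
        PySem.Chars.isdigit, Char.le_def, UInt32.le_iff_toNat_le] at h
  simp only [PySem.Chars.isspace]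
  simp only [Bool.or_eq_false_iff, Bool.and_eq_false_iff, decide_eq_false_iff_not, not_le]
  omega

lemma foldA (cs : List Char) : ∀ (out : List Char) (p : Bool), out ≠ [] →
    cs.foldl sanitizeStepA (out, p) = (out ++ (emitA p cs).1, (emitA p cs).2) := by
  induction cs with
  | nil => intro out p h; simp [emitA]
  | cons c cs ih =>
    intro out p h
    simp only [List.foldl_cons, emitA, sanitizeStepA]
    by_cases ha : PySem.Chars.isalnum c = true
    · simp [ha, ih (out ++ [c]) false (by simp)]
    · cases p
      · simp [ha, h, ih (out ++ ['_']) true (by simp)]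
      · simp [ha, h, ih out true h]

lemma foldA0 (cs : List Char) : (cs.foldl sanitizeStepA ([], false)).1 = emitS cs := by
  induction cs with
  | nil => simp [emitS]
  | cons c cs ih =>
    simp only [List.foldl_cons, emitS, sanitizeStepA]
    by_cases ha : PySem.Chars.isalnum c = true
    · simp [ha, foldA cs [c] false (by simp)]
    · simp [ha, ih]

lemma goWords (cs : List Char) : ∀ (cur : List Char) (acc : List (List Char)),
    PySem.Chars.split₀.go (cs.map sanitizeCleanB) cur acc = acc.reverse ++ wordsRec cs cur := by
  induction cs with
  | nil =>
    intro cur acc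
    simp only [List.map_nil, PySem.Chars.split₀.go, wordsRec]
    by_cases hc : cur.isEmpty <;> simp [hc]
  | cons c cs ih =>
    intro cur acc
    simp only [List.map_cons, PySem.Chars.split₀.go, wordsRec, sanitizeCleanB]
    by_cases ha : PySem.Chars.isalnum c = true
    · simp [ha, alnum_not_space ha, ih]
    · by_cases hc : cur.isEmpty <;>
        simp [ha, hc, ih, show PySem.Chars.isspace ' ' = true from by decide]

lemma wordsRec_ne_nil (cs : List Char) : ∀ (cur : List Char), cur ≠ [] → wordsRec cs cur ≠ [] := by
  induction cs with
  | nil => intro cur h; simp [wordsRec, h]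
  | cons c cs ih =>
    intro cur h
    simp only [wordsRec]
    by_cases ha : PySem.Chars.isalnum c = true
    · simp [ha]; exact ih _ (by simp)
    · simp [ha, List.isEmpty_iff, h]

lemma wordsRec_sound (cs : List Char) : ∀ (cur : List Char),
    (∀ ch ∈ cur, PySem.Chars.isalnum ch = true) →
    ∀ w ∈ wordsRec cs cur, w ≠ [] ∧ ∀ ch ∈ w, PySem.Chars.isalnum ch = true := by
  induction cs with
  | nil =>
    intro cur hcur w hw
    simp only [wordsRec] at hw
    by_cases hc : cur.isEmpty
    · simp [hc] at hw
    · simp [hc] at hw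
      subst hw
      refine ⟨by simpa [List.isEmpty_iff] using hc, fun ch hch => hcur ch (by simpa using hch)⟩
  | cons c cs ih =>
    intro cur hcur w hw
    simp only [wordsRec] at hw
    by_cases ha : PySem.Chars.isalnum c = true
    · simp only [ha, if_true] at hw
      exact ih (c :: cur) (fun ch hch => by rcases List.mem_cons.1 hch with h | h; exacts [h ▸ ha, hcur ch h]) w hw
    · simp only [ha, if_false, Bool.false_eq_true] at hw
      by_cases hc : cur.isEmpty
      · simp only [hc, if_true] at hw
        exact ih [] (by simp) w hw
      · simp only [hc, if_false, Bool.false_eq_true, List.mem_cons] at hw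
        rcases hw with hw | hw
        · subst hw
          refine ⟨by simpa [List.isEmpty_iff] using hc, fun ch hch => hcur ch (by simpa using hch)⟩
        · exact ih [] (by simp) w hw

lemma joinU_cons (w : List Char) (ws : List (List Char)) (h : ws ≠ []) :
    PySem.Chars.join ['_'] (w :: ws) = w ++ '_' :: PySem.Chars.join ['_'] ws := by
  cases ws with
  | nil => exact absurd rfl h
  | cons q rest => simp [PySem.Chars.join_cons_cons]

lemma emit_words (cs : List Char) :
    (∀ (cur : List Char), cur ≠ [] →
      cur.reverse ++ (emitA false cs).1 =
        PySem.Chars.join ['_'] (wordsRec cs cur) ++ (if (emitA false cs).2 then ['_'] else [])) ∧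
    ('_' :: (emitA true cs).1 =
      (if wordsRec cs [] = [] then []
       else '_' :: PySem.Chars.join ['_'] (wordsRec cs [])) ++
        (if (emitA true cs).2 then ['_'] else [])) := by
  induction cs with
  | nil =>
    constructor
    · intro cur h
      simp [emitA, wordsRec, List.isEmpty_iff, h, PySem.Chars.join_singleton]
    · simp [emitA, wordsRec]
  | cons c cs ih =>
    obtain ⟨iha, ihb⟩ := ih
    constructor
    · intro cur h
      simp only [emitA, wordsRec]
      by_cases ha : PySem.Chars.isalnum c = true
      · simpa [ha] using iha (c :: cur) (by simp)
      · simp only [ha, if_false, Bool.false_eq_true, List.isEmpty_iff, if_neg h]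
        by_cases hw : wordsRec cs [] = []
        · have ihb' : '_' :: (emitA true cs).1 = if (emitA true cs).2 = true then ['_'] else [] := by
            simpa [hw] using ihb
          rw [hw, ihb', PySem.Chars.join_singleton]
        · have ihb' : '_' :: (emitA true cs).1 =
              '_' :: (PySem.Chars.join ['_'] (wordsRec cs []) ++ (if (emitA true cs).2 = true then ['_'] else [])) := by
            simpa [hw] using ihb
          rw [ihb', joinU_cons _ _ hw]
          simp
    · simp only [emitA, wordsRec]
      by_cases ha : PySem.Chars.isalnum c = true
      · have hw := wordsRec_ne_nil cs [c] (by simp)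
        have := iha [c] (by simp)
        simp only [ha, if_true, if_neg hw, List.isEmpty_nil]
        simp only [List.reverse_singleton, List.singleton_append] at this
        simp [this]
      · simpa [ha] using ihb

lemma join_last (ws : List (List Char)) (hne : ws ≠ [])
    (h : ∀ w ∈ ws, w ≠ [] ∧ ∀ ch ∈ w, PySem.Chars.isalnum ch = true) :
    ∃ d l', (PySem.Chars.join ['_'] ws).reverse = d :: l' ∧ PySem.Chars.isalnum d = true := by
  induction ws with
  | nil => exact absurd rfl hne
  | cons w ws ih =>
    by_cases hws : ws = []
    · subst hws
      obtain ⟨hw, halnum⟩ := h w (by simp)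
      obtain ⟨d, l', hd⟩ := List.exists_cons_of_ne_nil
        (fun hr => hw (List.reverse_eq_nil_iff.1 hr))
      refine ⟨d, l', by simpa [PySem.Chars.join_singleton] using hd, halnum d ?_⟩
      have hdm : d ∈ w.reverse := by rw [hd]; exact List.mem_cons_self ..
      exact List.mem_reverse.1 hdm
    · obtain ⟨d, l', hd, halnum⟩ := ih hws (fun v hv => h v (by simp [hv]))
      refine ⟨d, l' ++ '_' :: w.reverse, ?_, halnum⟩
      rw [joinU_cons _ _ hws]
      simp [hd]

lemma strip_join (ws : List (List Char)) (hne : ws ≠ [])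
    (h : ∀ w ∈ ws, w ≠ [] ∧ ∀ ch ∈ w, PySem.Chars.isalnum ch = true)
    (tail : List Char) (ht : tail = [] ∨ tail = ['_']) :
    PySem.Chars.stripChars (PySem.Chars.join ['_'] ws ++ tail) ['_'] = PySem.Chars.join ['_'] ws := by
  obtain ⟨w0, rest, rfl⟩ := List.exists_cons_of_ne_nil hne
  obtain ⟨hw0, halnum0⟩ := h w0 (by simp)
  obtain ⟨a, w0', rfl⟩ := List.exists_cons_of_ne_nil hw0
  have hja : ∃ t, PySem.Chars.join ['_'] ((a :: w0') :: rest) = a :: t := by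
    by_cases hr : rest = []
    · exact ⟨w0', by simp [hr, PySem.Chars.join_singleton]⟩
    · exact ⟨w0' ++ '_' :: PySem.Chars.join ['_'] rest, by rw [joinU_cons _ _ hr]; simp⟩
  obtain ⟨t, hjt⟩ := hja
  obtain ⟨d, l', hd, hdal⟩ := join_last _ (by simp) h
  have hane : a ≠ '_' := alnum_ne_und (halnum0 a (by simp))
  have hdne : d ≠ '_' := alnum_ne_und hdal
  rw [hjt] at hd ⊢
  simp only [PySem.Chars.stripChars]
  have h1 : List.dropWhile (fun c => List.contains ['_'] c) (a :: (t ++ tail)) = a :: (t ++ tail) := by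
    simp [hane]
  rw [show (a :: t) ++ tail = a :: (t ++ tail) from rfl, h1]
  have hrev : List.dropWhile (fun c => List.contains ['_'] c) ((a :: t).reverse) = d :: l' := by
    rw [hd]; simp [hdne]
  have h3 : List.dropWhile (fun c => List.contains ['_'] c) ((a :: (t ++ tail)).reverse) = d :: l' := by
    have h2 : (a :: (t ++ tail)).reverse = tail.reverse ++ (a :: t).reverse := by simp
    rw [h2]
    rcases ht with rfl | rfl
    · simpa using hrev
    · simpa [List.dropWhile_cons] using hrev
  rw [h3, ← hd]
  simp

-- main: A's stripped buffer is B's joined word list, over any char list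
lemma mainEq (cs : List Char) :
    PySem.Chars.stripChars (cs.foldl sanitizeStepA ([], false)).1 ['_'] =
      PySem.Chars.join ['_'] (wordsRec cs []) := by
  rw [foldA0]
  induction cs with
  | nil => simp [emitS, wordsRec, PySem.Chars.stripChars, PySem.Chars.join_nil]
  | cons c cs ih =>
    simp only [emitS, wordsRec]
    by_cases ha : PySem.Chars.isalnum c = true
    · simp only [ha, if_true]
      have hew : c :: (emitA false cs).1 =
          PySem.Chars.join ['_'] (wordsRec cs [c]) ++ (if (emitA false cs).2 then ['_'] else []) := by
        simpa using (emit_words cs).1 [c] (by simp)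
      rw [hew]
      exact strip_join _ (wordsRec_ne_nil cs [c] (by simp))
        (wordsRec_sound cs [c] (by intro ch hch; rw [List.mem_singleton.1 hch]; exact ha))
        _ (by cases (emitA false cs).2 <;> simp)
    · simpa [ha] using ih

-- ===== VERDICT (by name: the statement is the Claim_ definition above) =====
theorem sanitize_token_name_spec : Claim_equal_sanitize_token_name := by
  intro text _
  unfold Spec_sanitize_token_name sanitize_token_name sanitize_token_name_alt
  have hsplit : PySem.Chars.split₀ ((PySem.Chars.upper text.toList).map sanitizeCleanB)
      = wordsRec (PySem.Chars.upper text.toList) [] := by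
    simpa [PySem.Chars.split₀] using goWords (PySem.Chars.upper text.toList) [] []
  have hmain := mainEq (PySem.Chars.upper text.toList)
  set ws := wordsRec (PySem.Chars.upper text.toList) [] with hws
  simp only [hsplit, hmain]
  by_cases hw : ws = []
  · simp [hw, PySem.Chars.join_nil]
  · have hjoin_ne : PySem.Chars.join ['_'] ws ≠ [] := by
      obtain ⟨d, l', hd, _⟩ := join_last ws hw (wordsRec_sound _ [] (by simp))
      intro hnil; rw [hnil] at hd; simp at hd
    simp [hw, hjoin_ne]
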